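-- pv_equiv track=rewrite | github.com/abdoabdo54/speed-send | backend/app/tasks_v2.py | _is_admin_email
-- ===== SOURCE A (Python) =====
-- def _is_admin_email(user_email: str, service_account_admin_email: str | None, user_name: str = None) -> bool:
--     """ULTRA-AGGRESSIVE admin detection to exclude admin addresses from sender pool.
--     Excludes:
--     - Exact match with configured ServiceAccount.admin_email
--     - Common admin aliases: admin@, administrator@, postmaster@
--     - Google default addresses: abuse@, support@
--     - No-reply patterns: noreply@, no-reply@, donotreply@
--     - System addresses: system@, automation@, bot@
--     - Admin names: admin, administrator, postmaster, system, automation, bot, test, demo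
--     - ANY user that matches the admin email used for sync
--     """
--     if not user_email:
--         return False
--
--     email_lower = user_email.strip().lower()
--
--     # CRITICAL: Check exact admin email match (this is the most important check)
--     if service_account_admin_email and email_lower == service_account_admin_email.strip().lower():
--         return True
--
--     # Extract local part (before @) for pattern matching
--     local_part = email_lower.split("@")[0]
--
--     # COMPREHENSIVE admin patterns
--     admin_patterns = {
--         'admin', 'administrator', 'postmaster', 'abuse', 'support',
--         'noreply', 'no-reply', 'donotreply', 'do-not-reply',
--         'system', 'automation', 'bot', 'nobot', 'no-bot',
--         'test', 'testing', 'demo', 'sample'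
--     }
--
--     # Check if local part matches any admin pattern
--     for pattern in admin_patterns:
--         if local_part == pattern or local_part.startswith(pattern + '.') or local_part.startswith(pattern + '_'):
--             return True
--
--     # Check user name for admin patterns
--     if user_name:
--         name_lower = user_name.strip().lower()
--         for pattern in admin_patterns:
--             if pattern in name_lower:
--                 return True
--
--     return False
-- ===== SOURCE B (Python) =====
-- ADMIN_PATTERNS = {
--     'admin', 'administrator', 'postmaster', 'abuse', 'support',
--     'noreply', 'no-reply', 'donotreply', 'do-not-reply',
--     'system', 'automation', 'bot', 'nobot', 'no-bot',
--     'test', 'testing', 'demo', 'sample'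
-- }
--
--
-- def _norm(s):
--     return s.strip().lower()
--
--
-- def _head(email):
--     # prefix of the full email up to the first '@', '.' or '_': since no admin
--     # pattern contains those characters, A's per-pattern ==/startswith('.')/
--     # startswith('_') scan over the local part is exactly `head in ADMIN_PATTERNS`,
--     # and stopping at '@' as well makes email.split('@') unnecessary.
--     head = ''
--     for c in email:
--         if c in '@._':
--             break
--         head += c
--     return head
--
--
-- def _is_admin_email(user_email, service_account_admin_email, user_name=None):
--     if not user_email:
--         return False
--     email = _norm(user_email)
--     exact = bool(service_account_admin_email) and email == _norm(service_account_admin_email)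
--     named = bool(user_name) and any(p in _norm(user_name) for p in ADMIN_PATTERNS)
--     return exact or _head(email) in ADMIN_PATTERNS or named
-- ===== Notes on version B (the rewrite author's own statement) =====
-- stated objective: simpler
-- what changed: A's split('@') plus 18-pattern scan with three prefix/equality tests per pattern is replaced by a single character scan of the normalised email up to the first '@', '.' or '_' followed by one set lookup (valid because no pattern contains those separators), and the early-return chain becomes one flat boolean expression 'exact or head in patterns or named'.
import Mathlib
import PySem

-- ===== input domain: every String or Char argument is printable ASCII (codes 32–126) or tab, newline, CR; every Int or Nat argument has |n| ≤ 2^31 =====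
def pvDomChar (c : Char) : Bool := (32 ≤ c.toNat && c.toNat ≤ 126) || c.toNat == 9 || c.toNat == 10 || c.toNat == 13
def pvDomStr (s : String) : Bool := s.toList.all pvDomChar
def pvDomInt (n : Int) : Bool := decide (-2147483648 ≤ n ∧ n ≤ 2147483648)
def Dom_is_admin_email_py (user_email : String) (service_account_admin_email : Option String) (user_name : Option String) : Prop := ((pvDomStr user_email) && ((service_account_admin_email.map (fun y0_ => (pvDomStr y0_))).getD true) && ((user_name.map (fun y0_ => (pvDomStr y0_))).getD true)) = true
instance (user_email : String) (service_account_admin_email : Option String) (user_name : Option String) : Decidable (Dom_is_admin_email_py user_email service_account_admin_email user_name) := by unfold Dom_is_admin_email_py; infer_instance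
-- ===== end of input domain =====

-- B replaces A's split('@') + 18-pattern prefix scan by one character scan of the email up to the
-- first '@', '.' or '_' and a single set lookup, and flattens the early-return chain into one
-- boolean expression (simpler; valid since no pattern contains those separators).

-- the admin pattern set literal (shared constant of both sources)
def pvPatterns : List String :=
  ["admin", "administrator", "postmaster", "abuse", "support",
   "noreply", "no-reply", "donotreply", "do-not-reply",
   "system", "automation", "bot", "nobot", "no-bot",
   "test", "testing", "demo", "sample"]

-- ===== PORT A =====
-- A's local-part check: loop over the pattern set with three tests per pattern
def pvCheckA (local_part : String) : Bool :=
  (PySem.Set.ofList pvPatterns).any (fun p =>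
    local_part == p || PySem.Str.startswith local_part (p ++ ".")
      || PySem.Str.startswith local_part (p ++ "_"))

def is_admin_email_py (user_email : String) (service_account_admin_email : Option String) (user_name : Option String) : Bool :=
  if user_email == "" then false
  else
    let email_lower := PySem.Str.lower (PySem.Str.strip user_email)
    if (match service_account_admin_email with
        | some s => s != "" && (email_lower == PySem.Str.lower (PySem.Str.strip s))
        | none => false) then true
    else
      let local_part := ((PySem.Str.split? email_lower "@").getD []).headD ""
      if pvCheckA local_part then true
      else
        match user_name with
        | some n =>
            if n != "" then
              let name_lower := PySem.Str.lower (PySem.Str.strip n)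
              (PySem.Set.ofList pvPatterns).any (fun p => PySem.Str.isIn p name_lower)
            else false
        | none => false

-- ===== PORT B =====
-- Source B's _norm helper
def pvNorm (s : String) : String := PySem.Str.lower (PySem.Str.strip s)

-- Source B's _head helper: the for/break scan over the email, stopping at '@', '.' or '_'
def pvScanHead : List Char → List Char
  | [] => []
  | c :: cs => if c = '@' || c = '.' || c = '_' then [] else c :: pvScanHead cs

def is_admin_email_py_alt (user_email : String) (service_account_admin_email : Option String) (user_name : Option String) : Bool :=
  if user_email == "" then false
  else
    let email := pvNorm user_email
    let exact := (service_account_admin_email.map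
      (fun s => s != "" && email == pvNorm s)).getD false
    let named := (user_name.map
      (fun n => n != "" && pvPatterns.any (fun p => PySem.Str.isIn p (pvNorm n)))).getD false
    exact || (PySem.Set.ofList pvPatterns).contains (String.ofList (pvScanHead email.toList)) || named

-- ===== PRECONDITION & SPEC =====
def Spec_is_admin_email_py (user_email : String) (service_account_admin_email : Option String) (user_name : Option String) (out : Bool) : Prop := out = is_admin_email_py_alt user_email service_account_admin_email user_name
instance (user_email : String) (service_account_admin_email : Option String) (user_name : Option String) (out : Bool) : Decidable (Spec_is_admin_email_py user_email service_account_admin_email user_name out) := by unfold Spec_is_admin_email_py; infer_instance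

-- ===== CLAIM (what is proved, stated in full; the proofs are below) =====
def Claim_equal_is_admin_email_py : Prop := ∀ (user_email : String) (service_account_admin_email : Option String) (user_name : Option String), Dom_is_admin_email_py user_email service_account_admin_email user_name → Spec_is_admin_email_py user_email service_account_admin_email user_name (is_admin_email_py user_email service_account_admin_email user_name)

-- ===== LEMMAS AND PROOFS =====

-- the local-part head up to the first '.' or '_' (proof-side notion linking the two checks)
def pvHeadChars : List Char → List Char
  | [] => []
  | c :: cs => if c = '.' || c = '_' then [] else c :: pvHeadChars cs

-- splitOn.go always emits its accumulator (reversed) first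
lemma pvGo_acc' (sep : List Char) : ∀ (fuel : Nat) (l cur : List Char) (acc : List (List Char)),
    ∃ r, PySem.Chars.splitOn.go sep fuel l cur acc = acc.reverse ++ r ∧ r ≠ [] := by
  intro fuel
  induction fuel with
  | zero =>
      intro l cur acc
      exact ⟨[cur.reverse ++ l], by simp [PySem.Chars.splitOn.go], by simp⟩
  | succ fuel ih =>
      intro l cur acc
      cases l with
      | nil => exact ⟨[cur.reverse], by simp [PySem.Chars.splitOn.go], by simp⟩
      | cons c rest =>
          by_cases h : sep.isPrefixOf (c :: rest) = true
          · obtain ⟨r, hr, hne⟩ := ih (List.drop sep.length (c :: rest)) [] (cur.reverse :: acc)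
            refine ⟨cur.reverse :: r, ?_, by simp⟩
            simp only [PySem.Chars.splitOn.go, h, if_true]
            rw [hr]; simp
          · obtain ⟨r, hr, hne⟩ := ih rest (c :: cur) acc
            refine ⟨r, ?_, hne⟩
            simp only [PySem.Chars.splitOn.go, h]
            exact hr

-- the first piece of a single-character split is the prefix before the first separator
lemma pvGo_head (a : Char) : ∀ (fuel : Nat) (l cur : List Char), l.length ≤ fuel →
    (PySem.Chars.splitOn.go [a] fuel l cur []).headD [] = cur.reverse ++ l.takeWhile (· ≠ a) := by
  intro fuel
  induction fuel with
  | zero =>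
      intro l cur hl
      have : l = [] := List.eq_nil_of_length_eq_zero (Nat.le_zero.mp hl)
      subst this
      simp [PySem.Chars.splitOn.go]
  | succ fuel ih =>
      intro l cur hl
      cases l with
      | nil => simp [PySem.Chars.splitOn.go]
      | cons c rest =>
          by_cases h : c = a
          · subst h
            have hp : [c].isPrefixOf (c :: rest) = true := by simp [List.isPrefixOf]
            obtain ⟨r, hr, hne⟩ := pvGo_acc' [c] fuel (List.drop [c].length (c :: rest)) [] [cur.reverse]
            simp only [PySem.Chars.splitOn.go, hp, if_true]
            simp only [List.length_cons, List.length_nil] at hr ⊢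
            rw [hr]
            simp [List.takeWhile]
          · have hp : [a].isPrefixOf (c :: rest) = false := by
              simp [List.isPrefixOf]
              exact fun he => h he.symm
            simp only [PySem.Chars.splitOn.go, hp, Bool.false_eq_true, if_false]
            rw [ih rest (c :: cur) (by simpa using Nat.le_of_succ_le_succ hl)]
            simp [List.takeWhile, h]
  
-- the char scan of the whole email is the '.'/'_' head of the part before '@'
lemma pvScanHead_eq (l : List Char) :
    pvScanHead l = pvHeadChars (l.takeWhile (· ≠ '@')) := by
  induction l with
  | nil => simp [pvScanHead, pvHeadChars]
  | cons c cs ih =>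
      by_cases h1 : c = '@'
      · subst h1; simp [pvScanHead, pvHeadChars, List.takeWhile]
      · by_cases h2 : c = '.' ∨ c = '_'
        · rcases h2 with h2 | h2 <;> subst h2 <;>
            simp_all [pvScanHead, pvHeadChars, List.takeWhile]
        · rw [not_or] at h2
          simp [pvScanHead, pvHeadChars, List.takeWhile, h1, h2.1, h2.2, ih]

-- head characterisation: for a separator-free pattern p, matching p exactly or having
-- p followed by '.' or '_' as a prefix is the same as the head being p
lemma pvHead_key (p : List Char) (hp : ∀ c ∈ p, c ≠ '.' ∧ c ≠ '_') (l : List Char) :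
    pvHeadChars l = p ↔ (l = p ∨ (p ++ ['.']) <+: l ∨ (p ++ ['_']) <+: l) := by
  induction p generalizing l with
  | nil =>
      cases l with
      | nil => simp [pvHeadChars]
      | cons c cs =>
          by_cases h : c = '.' ∨ c = '_'
          · simp only [pvHeadChars, List.nil_append]
            rcases h with h | h <;> subst h <;> simp [List.cons_prefix_cons]
          · rw [not_or] at h
            simp [pvHeadChars, h.1, h.2, List.cons_prefix_cons, eq_comm]
  | cons a p' ih =>
      have ha := hp a (by simp)
      cases l with
      | nil => simp [pvHeadChars]
      | cons c cs =>
          by_cases h : c = '.' ∨ c = '_'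
          · have hl : pvHeadChars (c :: cs) = [] := by
              rcases h with h | h <;> simp [pvHeadChars, h]
            have hac : ¬ a = c := by
              rcases h with h | h <;> subst h
              · exact ha.1
              · exact ha.2
            have hca : ¬ c = a := fun he => hac he.symm
            simp [hl, List.cons_prefix_cons, hac, hca]
          · rw [not_or] at h
            have hih := ih (fun c hc => hp c (List.mem_cons_of_mem _ hc)) cs
            have hl : pvHeadChars (c :: cs) = c :: pvHeadChars cs := by
              simp [pvHeadChars, h.1, h.2]
            rw [hl]
            simp only [List.cons_append, List.cons_eq_cons, List.cons_prefix_cons]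
            by_cases hca : c = a
            · subst hca
              rw [hih]; tauto
            · have hac : ¬ a = c := fun he => hca he.symm
              simp [hca, hac]

-- no admin pattern contains a separator
lemma pvPatterns_sepFree : ∀ p ∈ pvPatterns, ∀ c ∈ p.toList, c ≠ '.' ∧ c ≠ '_' := by
  have h : pvPatterns.all (fun p => p.toList.all (fun c => decide (c ≠ '.' ∧ c ≠ '_'))) = true := rfl
  intro p hp c hc
  exact of_decide_eq_true (List.all_eq_true.mp (List.all_eq_true.mp h p hp) c hc)

-- A's pattern scan of the local part equals one lookup of its '.'/'_' head
lemma pvCheckA_head (s : String) :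
    pvCheckA s = (PySem.Set.ofList pvPatterns).contains (String.ofList (pvHeadChars s.toList)) := by
  unfold pvCheckA
  rw [Bool.eq_iff_iff]
  simp only [List.any_eq_true, PySem.Set.contains, List.contains_iff_mem, PySem.Set.mem_ofList,
    Bool.or_eq_true, beq_iff_eq, PySem.Str.startswith_eq, PySem.Chars.startswith_iff]
  constructor
  · rintro ⟨p, hp, hf⟩
    have hsf := pvPatterns_sepFree p hp
    have hkey := pvHead_key p.toList hsf s.toList
    have hhead : pvHeadChars s.toList = p.toList := by
      apply hkey.mpr
      rcases hf with (hf | hf) | hf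
      · exact Or.inl (String.toList_inj.mpr hf)
      · exact Or.inr (Or.inl (by simpa using hf))
      · exact Or.inr (Or.inr (by simpa using hf))
    have hofl : String.ofList (pvHeadChars s.toList) = p := by rw [hhead]; simp
    exact hofl ▸ hp
  · intro hmem
    refine ⟨String.ofList (pvHeadChars s.toList), hmem, ?_⟩
    have hsf := pvPatterns_sepFree _ hmem
    have hkey := pvHead_key (String.ofList (pvHeadChars s.toList)).toList hsf s.toList
    have hhead : pvHeadChars s.toList = (String.ofList (pvHeadChars s.toList)).toList := by simp
    rcases hkey.mp hhead with h | h | h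
    · exact Or.inl (Or.inl (String.toList_inj.mp h))
    · exact Or.inl (Or.inr (by simpa using h))
    · exact Or.inr (by simpa using h)

-- A's local part (first piece of split('@')) at char level
lemma pvLocal_eq (s : String) :
    (((PySem.Str.split? s "@").getD []).headD "").toList = s.toList.takeWhile (· ≠ '@') := by
  unfold PySem.Str.split?
  have hsep : ("@" : String).toList = ['@'] := rfl
  rw [hsep]
  unfold PySem.Chars.split?
  simp only [List.isEmpty_cons, Bool.false_eq_true, if_false, Option.map_some, Option.getD_some]
  have hmap : ∀ xs : List (List Char),
      ((xs.map String.ofList).headD "").toList = xs.headD [] := by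
    intro xs; cases xs <;> simp
  rw [hmap]
  unfold PySem.Chars.splitOn
  have hgo := pvGo_head '@' (s.toList.length + 1) s.toList [] (Nat.le_succ _)
  simpa using hgo

-- the two local-part checks agree on every string
lemma pvCheck_eq (s : String) :
    pvCheckA (((PySem.Str.split? s "@").getD []).headD "")
      = (PySem.Set.ofList pvPatterns).contains (String.ofList (pvScanHead s.toList)) := by
  rw [pvCheckA_head, pvScanHead_eq, pvLocal_eq]

-- sets: any-membership form of Set.any over the pattern set equals the plain list any
lemma pvSetAny_eq (f : String → Bool) :
    (PySem.Set.ofList pvPatterns).any f = pvPatterns.any f := by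
  rfl

-- ===== VERDICT (by name: the statement is the Claim_ definition above) =====
theorem is_admin_email_py_spec : Claim_equal_is_admin_email_py := by
  intro user_email sa un _
  unfold Spec_is_admin_email_py is_admin_email_py is_admin_email_py_alt
  by_cases he : user_email == ""
  · simp [he]
  · simp only [he, pvNorm]
    rw [pvCheck_eq]
    cases sa with
    | none =>
        cases un with
        | none => simp
        | some n => cases hn : n != "" <;> simp [hn, pvSetAny_eq]
    | some s =>
        cases hs : (s != "" && (PySem.Str.lower (PySem.Str.strip user_email) == PySem.Str.lower (PySem.Str.strip s))) with
        | true => simp [hs]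
        | false =>
          cases un with
          | none => simp [hs]
          | some n => cases hn : n != "" <;> simp [hs, hn, pvSetAny_eq]
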